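-- pv_equiv track=rewrite | github.com/RubenEschauzier/generate-pretraining-data-join-optimizer | src/train_dataset_generation/generate_random_walk_queries.py | determine_outer_triples
-- ===== SOURCE A (Python) =====
-- def determine_outer_triples(walk):
--     # Get all entities to get entities that occur multiple times
--     all_entities_in_walk = []
--     for triple in walk:
--         all_entities_in_walk.append(triple[0])
--         all_entities_in_walk.append(triple[2])
--
--     all_subj_walk = set([triple[0] for triple in walk])
--     all_obj_walk = set([triple[2] for triple in walk])
--
--     # Get all objects that are not connected to another triple pattern
--     outer_objects = all_obj_walk.difference(all_subj_walk)
--     outer_objects_no_common = [obj for obj in outer_objects if all_entities_in_walk.count(obj) < 2]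
--
--     # Get associated triples, these triples can become literal queries in query generation
--     outer_object_triples = set([triple for triple in walk if triple[2] in outer_objects_no_common])
--     return outer_object_triples
-- ===== SOURCE B (Python) =====
-- def determine_outer_triples(walk):
--     # One pass: count every subject and object occurrence; an object with
--     # total count 1 occurs only once in the walk, hence is never a subject
--     # and never shared with another triple.
--     counts = {}
--     for triple in walk:
--         counts[triple[0]] = counts.get(triple[0], 0) + 1
--         counts[triple[2]] = counts.get(triple[2], 0) + 1
--     return {triple for triple in walk if counts[triple[2]] == 1}
-- ===== Notes on version B (the rewrite author's own statement) =====
-- stated objective: faster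
-- what changed: Replaces the entity list + two sets + set-difference + quadratic list.count filter with a single frequency dictionary built in one pass; count==1 on the object already implies it is not a subject, so the difference stage disappears.
import Mathlib
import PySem

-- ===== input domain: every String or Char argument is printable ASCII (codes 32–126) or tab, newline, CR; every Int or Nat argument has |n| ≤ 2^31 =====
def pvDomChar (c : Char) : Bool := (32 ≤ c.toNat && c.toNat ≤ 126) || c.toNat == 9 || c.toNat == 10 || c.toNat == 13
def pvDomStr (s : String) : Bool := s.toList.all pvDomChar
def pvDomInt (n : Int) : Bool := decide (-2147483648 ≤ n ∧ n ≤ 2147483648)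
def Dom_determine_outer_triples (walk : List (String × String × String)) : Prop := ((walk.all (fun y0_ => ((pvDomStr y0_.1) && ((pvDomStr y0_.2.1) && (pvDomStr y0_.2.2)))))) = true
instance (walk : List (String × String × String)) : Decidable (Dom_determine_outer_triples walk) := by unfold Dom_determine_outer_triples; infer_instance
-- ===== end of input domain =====

-- B replaces A's entity list + two sets + set-difference + quadratic count filter by one
-- frequency dictionary built in a single pass (objective: simpler).

-- ===== PORT A =====
def determine_outer_triples (walk : List (String × String × String)) : List (String × String × String) :=
  let all_entities_in_walk :=
    walk.foldl (fun acc triple => (acc ++ [triple.1]) ++ [triple.2.2]) []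
  let all_subj_walk := PySem.Set.ofList (walk.map (fun triple => triple.1))
  let all_obj_walk := PySem.Set.ofList (walk.map (fun triple => triple.2.2))
  let outer_objects := PySem.Set.diff all_obj_walk all_subj_walk
  let outer_objects_no_common :=
    outer_objects.filter (fun obj => all_entities_in_walk.count obj < 2)
  PySem.Set.ofList (walk.filter (fun triple => outer_objects_no_common.contains triple.2.2))

-- ===== PORT B =====
def determine_outer_triples_alt (walk : List (String × String × String)) : List (String × String × String) :=
  let counts :=
    walk.foldl (fun d triple =>
      let d := d.insert triple.1 (d.getD triple.1 0 + 1)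
      d.insert triple.2.2 (d.getD triple.2.2 0 + 1)) (PySem.Dict.empty (κ := String) (ν := Int))
  -- counts[triple[2]]: the key is always present (inserted while counting triple itself), so getD is exact
  PySem.Set.ofList (walk.filter (fun triple => counts.getD triple.2.2 0 == 1))

-- ===== PRECONDITION & SPEC =====
def Spec_determine_outer_triples (walk : List (String × String × String)) (out : List (String × String × String)) : Prop := out = determine_outer_triples_alt walk
instance (walk : List (String × String × String)) (out : List (String × String × String)) : Decidable (Spec_determine_outer_triples walk out) := by unfold Spec_determine_outer_triples; infer_instance

-- ===== CLAIM (what is proved, stated in full; the proofs are below) =====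
def Claim_equal_determine_outer_triples : Prop := ∀ (walk : List (String × String × String)), Dom_determine_outer_triples walk → Spec_determine_outer_triples walk (determine_outer_triples walk)

-- ===== LEMMAS AND PROOFS =====

-- the flat list of all subjects and objects, in A's order
def pvEnts (walk : List (String × String × String)) : List String :=
  walk.flatMap (fun t => [t.1, t.2.2])

theorem pvEnts_foldl (walk : List (String × String × String)) (acc : List String) :
    walk.foldl (fun acc triple => (acc ++ [triple.1]) ++ [triple.2.2]) acc = acc ++ pvEnts walk := by
  induction walk generalizing acc with
  | nil => simp [pvEnts]
  | cons t w ih => simp [pvEnts, List.foldl_cons, List.flatMap]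

theorem pvCounts_foldl (walk : List (String × String × String)) (d : PySem.Dict String Int) :
    walk.foldl (fun d triple =>
      let d := d.insert triple.1 (d.getD triple.1 0 + 1)
      d.insert triple.2.2 (d.getD triple.2.2 0 + 1)) d
    = (pvEnts walk).foldl (fun d x => d.insert x (d.getD x 0 + 1)) d := by
  induction walk generalizing d with
  | nil => simp [pvEnts]
  | cons t w ih => simp [pvEnts, List.flatMap_cons, List.foldl_cons, ih]

theorem pvCounts_getD (walk : List (String × String × String)) (v : String) :
    (walk.foldl (fun d triple =>
      let d := d.insert triple.1 (d.getD triple.1 0 + 1)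
      d.insert triple.2.2 (d.getD triple.2.2 0 + 1)) (PySem.Dict.empty (κ := String) (ν := Int))).getD v 0
    = ((pvEnts walk).count v : Int) := by
  rw [pvCounts_foldl]
  rw [PySem.Dict.getD_foldl_insert_add_one]
  simp

-- the heart of the equivalence: for an object v of a triple of the walk, occurring exactly
-- once among all subjects and objects ↔ not a subject and occurring fewer than twice
theorem pvCount_one_iff (walk : List (String × String × String))
    (t : String × String × String) (ht : t ∈ walk) :
    ((pvEnts walk).count t.2.2 = 1) ↔
      ((¬ ∃ u ∈ walk, u.1 = t.2.2) ∧ (pvEnts walk).count t.2.2 < 2) := by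
  have hmem : t.2.2 ∈ pvEnts walk := by
    simp only [pvEnts, List.mem_flatMap]
    exact ⟨t, ht, by simp⟩
  have hpos : 1 ≤ (pvEnts walk).count t.2.2 := List.one_le_count_iff.mpr hmem
  constructor
  · rintro h1
    refine ⟨?_, by omega⟩
    rintro ⟨u, hu, hu1⟩
    -- u is a subject equal to v := t.2.2; show count ≥ 2, contradicting h1
    obtain ⟨l1, l2, rfl⟩ := List.append_of_mem hu
    have hsplit : pvEnts (l1 ++ u :: l2) = pvEnts l1 ++ ([u.1, u.2.2] ++ pvEnts l2) := by
      simp [pvEnts]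
    rw [hsplit] at h1
    simp only [List.count_append] at h1
    by_cases hue : u.2.2 = t.2.2
    · have : List.count t.2.2 [u.1, u.2.2] = 2 := by
        simp [hu1, hue]
      omega
    · have hcu : List.count t.2.2 [u.1, u.2.2] = 1 := by
        simp [hu1, hue]
      have htne : t ≠ u := by
        intro h; exact hue (by rw [h])
      have ht' : t ∈ l1 ∨ t ∈ l2 := by
        rcases List.mem_append.mp ht with h | h
        · exact Or.inl h
        · rcases List.mem_cons.mp h with h | h
          · exact absurd h htne
          · exact Or.inr h
      have : 1 ≤ (pvEnts l1).count t.2.2 + (pvEnts l2).count t.2.2 := by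
        rcases ht' with h | h
        · have : t.2.2 ∈ pvEnts l1 := by
            simp only [pvEnts, List.mem_flatMap]; exact ⟨t, h, by simp⟩
          have := List.one_le_count_iff.mpr this
          omega
        · have : t.2.2 ∈ pvEnts l2 := by
            simp only [pvEnts, List.mem_flatMap]; exact ⟨t, h, by simp⟩
          have := List.one_le_count_iff.mpr this
          omega
      omega
  · rintro ⟨hns, hlt⟩
    omega

theorem determine_outer_triples_spec' (walk : List (String × String × String)) :
    determine_outer_triples walk = determine_outer_triples_alt walk := by
  unfold determine_outer_triples determine_outer_triples_alt
  simp only []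
  congr 1
  apply List.filter_congr
  intro t ht
  rw [pvEnts_foldl, List.nil_append, pvCounts_getD]
  have hiff := pvCount_one_iff walk t ht
  simp only [List.contains_eq_mem, List.mem_filter, PySem.Set.mem_diff,
    PySem.Set.mem_ofList, List.mem_map]
  apply Bool.eq_iff_iff.mpr
  simp only [decide_eq_true_eq, beq_iff_eq, Nat.cast_eq_one]
  constructor
  · rintro ⟨⟨⟨u, hu, hu2⟩, hns⟩, hlt⟩
    have : (pvEnts walk).count t.2.2 = 1 := by
      apply hiff.mpr
      refine ⟨?_, by simpa using hlt⟩
      rintro ⟨u', hu', hu'1⟩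
      exact hns ⟨u', hu', hu'1⟩
    exact_mod_cast this
  · intro h1
    have h1' : (pvEnts walk).count t.2.2 = 1 := by exact_mod_cast h1
    obtain ⟨hns, hlt⟩ := hiff.mp h1'
    refine ⟨⟨⟨t, ht, rfl⟩, ?_⟩, by simpa using hlt⟩
    rintro ⟨u, hu, hu1⟩
    exact hns ⟨u, hu, hu1⟩

-- ===== VERDICT (by name: the statement is the Claim_ definition above) =====
theorem determine_outer_triples_spec : Claim_equal_determine_outer_triples := by
  intro walk _
  exact determine_outer_triples_spec' walk
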